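-- pv_equiv track=rewrite | github.com/goodbam/CodingTest | 모의고사.py | solution
-- ===== SOURCE A (Python) =====
-- def solution(answers):
--     SuFoJa1 = [1, 2, 3, 4, 5] # 5
--     SuFoJa2 = [2, 1, 2, 3, 2, 4, 2, 5] # 8
--     SuFoJa3 = [3, 3, 1, 1, 2, 2, 4, 4, 5, 5] # 10
--     score = [[1,0],[2,0],[3,0]]
--
--
--     for i in range(0,len(answers)):
--         if SuFoJa1[i % 5] == answers[i]:
--             score[0][1] += 1
--
--         if SuFoJa2[i % 8] == answers[i]:
--             score[1][1] += 1
--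
--         if SuFoJa3[i % 10] == answers[i]:
--             score[2][1] += 1
--
--     max_value = []
--     for key, value in score:
--         max_value.append(value)
--     max_value.sort()
--
--     answer = []
--     i = 0
--     for key,value in score:
--         if score[i][1] == max_value[2]:
--             answer.append(key)
--         i += 1
--
--     return answer
-- ===== SOURCE B (Python) =====
-- def solution(answers):
--     patterns = [[1, 2, 3, 4, 5],
--                 [2, 1, 2, 3, 2, 4, 2, 5],
--                 [3, 3, 1, 1, 2, 2, 4, 4, 5, 5]]
--     # one pass over answers: histogram keyed by (index mod 40, value); 40 = lcm(5, 8, 10),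
--     # so each pattern's hits are read off the table without rescanning answers
--     buckets = {}
--     for i, a in enumerate(answers):
--         key = (i % 40, a)
--         buckets[key] = buckets.get(key, 0) + 1
--     scores = [sum(buckets.get((r, p[r % len(p)]), 0) for r in range(40))
--               for p in patterns]
--     best = max(scores)
--     return [j + 1 for j in range(3) if scores[j] == best]
-- ===== Notes on version B (the rewrite author's own statement) =====
-- stated objective: alternative
-- what changed: Replaces A's per-index comparison against all three patterns plus a sort of the three scores with a single histogram pass keyed by (index mod 40, answer) - 40 = lcm of the pattern periods - from which each pattern's score is read off the 40-entry table, followed by a direct max/filter.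
import Mathlib
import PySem

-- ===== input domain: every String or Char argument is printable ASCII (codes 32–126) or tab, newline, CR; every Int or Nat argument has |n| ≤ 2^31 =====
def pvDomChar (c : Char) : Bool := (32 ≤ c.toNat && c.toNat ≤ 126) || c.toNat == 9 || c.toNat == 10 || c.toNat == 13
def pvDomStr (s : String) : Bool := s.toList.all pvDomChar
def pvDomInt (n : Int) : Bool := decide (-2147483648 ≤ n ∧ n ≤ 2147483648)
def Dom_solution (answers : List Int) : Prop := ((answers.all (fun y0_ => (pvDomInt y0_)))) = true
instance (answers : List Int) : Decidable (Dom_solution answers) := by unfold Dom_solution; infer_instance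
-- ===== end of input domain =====

-- B replaces A's per-index comparison against all three patterns plus a sort of the three
-- scores with one histogram pass keyed by (index mod 40, answer) — 40 = lcm of the pattern
-- periods — from which each score is read off the table, then a direct max/filter (objective: alternative).


-- ===== PORT A =====
-- the fixed 3-element list-of-lists `score` is transliterated as a triple of counters;
-- the keys 1,2,3 are re-attached where the Python iterates `for key, value in score`
def solution (answers : List Int) : List Int :=
  let sc :=
    (PySem.List.pyRange 0 (answers.length : Int) 1).foldl
      (fun (sc : Int × Int × Int) i =>
        let x := PySem.List.pyGetD answers i 0
        let s1 := if PySem.List.pyGetD [1, 2, 3, 4, 5] (PySem.Int.mod i 5) 0 = x then sc.1 + 1 else sc.1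
        let s2 := if PySem.List.pyGetD [2, 1, 2, 3, 2, 4, 2, 5] (PySem.Int.mod i 8) 0 = x then sc.2.1 + 1 else sc.2.1
        let s3 := if PySem.List.pyGetD [3, 3, 1, 1, 2, 2, 4, 4, 5, 5] (PySem.Int.mod i 10) 0 = x then sc.2.2 + 1 else sc.2.2
        (s1, s2, s3)) (0, 0, 0)
  let score : List (Int × Int) := [(1, sc.1), (2, sc.2.1), (3, sc.2.2)]
  let maxValue := score.foldl (fun acc kv => acc ++ [kv.2]) []
  let maxValueSorted := PySem.List.sorted maxValue (fun x => x) false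
  let m := PySem.List.pyGetD maxValueSorted 2 0
  score.foldl (fun acc kv => if kv.2 = m then acc ++ [kv.1] else acc) []

-- ===== PORT B =====
-- sum(buckets.get((r, p[r % len(p)]), 0) for r in range(40))
def pvScore (buckets : PySem.Dict (Int × Int) Int) (p : List Int) : Int :=
  ((PySem.List.pyRange 0 40 1).map
    (fun r => PySem.Dict.getD buckets (r, PySem.List.pyGetD p (PySem.Int.mod r (p.length : Int)) 0) 0)).sum

def solution_alt (answers : List Int) : List Int :=
  let patterns : List (List Int) :=
    [[1, 2, 3, 4, 5], [2, 1, 2, 3, 2, 4, 2, 5], [3, 3, 1, 1, 2, 2, 4, 4, 5, 5]]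
  let buckets := (PySem.List.enumerate answers 0).foldl
    (fun (d : PySem.Dict (Int × Int) Int) ia =>
      let key := (PySem.Int.mod ia.1 40, ia.2)
      PySem.Dict.insert d key (PySem.Dict.getD d key 0 + 1))
    PySem.Dict.empty
  let scores := patterns.map (fun p => pvScore buckets p)
  let best := (PySem.List.max? scores (fun x => x)).getD 0   -- scores has 3 elements, never none
  ((PySem.List.pyRange 0 3 1).filter
    (fun j => PySem.List.pyGetD scores j 0 = best)).map (fun j => j + 1)

-- ===== PRECONDITION & SPEC =====
def Spec_solution (answers : List Int) (out : List Int) : Prop := out = solution_alt answers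
instance (answers : List Int) (out : List Int) : Decidable (Spec_solution answers out) := by unfold Spec_solution; infer_instance

-- ===== CLAIM (what is proved, stated in full; the proofs are below) =====
def Claim_equal_solution : Prop := ∀ (answers : List Int), Dom_solution answers → Spec_solution answers (solution answers)

-- ===== LEMMAS AND PROOFS =====

-- canonical count: matches of pattern p against answers, over plain Nat indices
def pvCnt (p : List Int) (answers : List Int) : Nat :=
  (List.range answers.length).countP
    (fun k => decide (p.getD (k % p.length) 0 = answers.getD k 0))

-- A's combined loop computes the three canonical counts
set_option maxHeartbeats 1000000 in
lemma pvCnt_A (answers : List Int) :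
    ∀ (n : Nat) (a b c : Int),
      ((List.range n).map (fun k => ((k : Nat) : Int))).foldl
        (fun (sc : Int × Int × Int) i =>
          let x := PySem.List.pyGetD answers i 0
          let s1 := if PySem.List.pyGetD [1, 2, 3, 4, 5] (PySem.Int.mod i 5) 0 = x then sc.1 + 1 else sc.1
          let s2 := if PySem.List.pyGetD [2, 1, 2, 3, 2, 4, 2, 5] (PySem.Int.mod i 8) 0 = x then sc.2.1 + 1 else sc.2.1
          let s3 := if PySem.List.pyGetD [3, 3, 1, 1, 2, 2, 4, 4, 5, 5] (PySem.Int.mod i 10) 0 = x then sc.2.2 + 1 else sc.2.2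
          (s1, s2, s3)) (a, b, c)
      = (a + ((List.range n).countP (fun k => decide (([1,2,3,4,5] : List Int).getD (k % 5) 0 = answers.getD k 0)) : Int),
         b + ((List.range n).countP (fun k => decide (([2,1,2,3,2,4,2,5] : List Int).getD (k % 8) 0 = answers.getD k 0)) : Int),
         c + ((List.range n).countP (fun k => decide (([3,3,1,1,2,2,4,4,5,5] : List Int).getD (k % 10) 0 = answers.getD k 0)) : Int)) := by
  intro n
  induction n with
  | zero => intro a b c; simp
  | succ n ih =>
    intro a b c
    rw [List.range_succ, List.map_append, List.foldl_append, ih a b c]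
    simp only [List.map_cons, List.map_nil, List.foldl_cons, List.foldl_nil,
      List.countP_append, List.countP_cons, List.countP_nil, Nat.zero_add, decide_eq_true_eq]
    have hm5 : PySem.Int.mod ((n : Nat) : Int) 5 = ((n % 5 : Nat) : Int) := by
      exact_mod_cast PySem.Int.mod_natCast n 5
    have hm8 : PySem.Int.mod ((n : Nat) : Int) 8 = ((n % 8 : Nat) : Int) := by
      exact_mod_cast PySem.Int.mod_natCast n 8
    have hm10 : PySem.Int.mod ((n : Nat) : Int) 10 = ((n % 10 : Nat) : Int) := by
      exact_mod_cast PySem.Int.mod_natCast n 10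
    simp only [hm5, hm8, hm10, PySem.List.pyGetD_natCast]
    have comp : ∀ (P : Prop) [Decidable P] (u : Int) (cnt : Nat),
        (if P then u + (cnt : Int) + 1 else u + (cnt : Int))
          = u + ((cnt + if P then 1 else 0 : Nat) : Int) := by
      intro P _ u cnt
      by_cases h : P
      · simp [h]; ring
      · simp [h]
    simp only [Prod.mk.injEq]
    refine ⟨?_, ?_, ?_⟩
    all_goals apply comp

-- enumerate as an indexed range
lemma pvEnum (xs : List Int) :
    ∀ (s : Nat),
      PySem.List.enumerate xs (s : Int)
        = (List.range xs.length).map (fun k => (((s + k : Nat) : Int), xs.getD k 0)) := by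
  induction xs with
  | nil => intro s; simp [PySem.List.enumerate_nil]
  | cons x xs ih =>
    intro s
    rw [PySem.List.enumerate_cons]
    have h1 : ((s : Int) + 1) = ((s + 1 : Nat) : Int) := by push_cast; ring
    rw [h1, ih (s + 1)]
    simp [List.range_succ_eq_map, Function.comp]
    intro a _
    ring

-- inserting one histogram increment changes a sum of lookups over distinct keys by 0 or 1
lemma pvDelta (d : PySem.Dict (Int × Int) Int) (m a : Int) (f : Int → Int) :
    ∀ rs : List Int, rs.Nodup →
      (rs.map (fun r => PySem.Dict.getD
          (PySem.Dict.insert d (m, a) (PySem.Dict.getD d (m, a) 0 + 1)) (r, f r) 0)).sum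
        = (rs.map (fun r => PySem.Dict.getD d (r, f r) 0)).sum
          + (if m ∈ rs ∧ f m = a then 1 else 0) := by
  intro rs
  induction rs with
  | nil => intro _; simp
  | cons r rs ih =>
    intro hnd
    have hr : r ∉ rs := (List.nodup_cons.mp hnd).1
    have htail := ih (List.nodup_cons.mp hnd).2
    simp only [List.map_cons, List.sum_cons]
    rw [htail, PySem.Dict.getD_insert]
    by_cases h : ((r, f r) : Int × Int) = (m, a)
    · have hm : r = m := congrArg Prod.fst h
      have ha : f r = a := congrArg Prod.snd h
      have hnot : ¬ (m ∈ rs ∧ f m = a) := fun hc => hr (hm ▸ hc.1)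
      have hyes : m ∈ r :: rs ∧ f m = a := ⟨by simp [hm], by rw [← hm]; exact ha⟩
      rw [if_pos h, if_neg hnot, if_pos hyes, ← h]
      ring
    · rw [if_neg h]
      have hiff : (m ∈ r :: rs ∧ f m = a) ↔ (m ∈ rs ∧ f m = a) := by
        constructor
        · rintro ⟨hmem, hfa⟩
          refine ⟨?_, hfa⟩
          rcases List.mem_cons.mp hmem with hmr | hmem'
          · have hc : ((r, f r) : Int × Int) = (m, a) := by
              rw [← hmr]; exact congrArg (Prod.mk m) hfa
            exact (h hc).elim
          · exact hmem'
        · rintro ⟨hmem, hfa⟩; exact ⟨List.mem_cons_of_mem _ hmem, hfa⟩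
      rw [if_congr hiff rfl rfl]
      ring

-- the histogram fold over the first n answers yields pattern scores = canonical counts
lemma pvBuild (xs p : List Int) (hL : p.length ∣ 40) :
    ∀ n : Nat,
      pvScore
        (((List.range n).map (fun k => (((k : Nat) : Int), xs.getD k 0))).foldl
          (fun (d : PySem.Dict (Int × Int) Int) ia =>
            let key := (PySem.Int.mod ia.1 40, ia.2)
            PySem.Dict.insert d key (PySem.Dict.getD d key 0 + 1))
          PySem.Dict.empty) p
      = ((List.range n).countP
          (fun k => decide (p.getD (k % p.length) 0 = xs.getD k 0)) : Int) := by
  intro n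
  induction n with
  | zero => simp [pvScore]
  | succ n ih =>
    rw [List.range_succ, List.map_append, List.foldl_append]
    simp only [List.map_cons, List.map_nil, List.foldl_cons, List.foldl_nil,
      List.countP_append, List.countP_cons, List.countP_nil, Nat.zero_add]
    have hm40 : PySem.Int.mod ((n : Nat) : Int) 40 = ((n % 40 : Nat) : Int) := by
      exact_mod_cast PySem.Int.mod_natCast n 40
    unfold pvScore
    rw [hm40]
    rw [pvDelta _ ((n % 40 : Nat) : Int) (xs.getD n 0)
      (fun r => PySem.List.pyGetD p (PySem.Int.mod r (p.length : Int)) 0)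
      (PySem.List.pyRange 0 40 1) (PySem.List.nodup_pyRange_one 0 40)]
    rw [← pvScore]
    rw [ih]
    have hmem : ((n % 40 : Nat) : Int) ∈ PySem.List.pyRange 0 40 1 := by
      rw [PySem.List.mem_pyRange_one]
      constructor
      · exact_mod_cast Nat.zero_le _
      · exact_mod_cast Nat.mod_lt n (by norm_num)
    have hf : PySem.List.pyGetD p (PySem.Int.mod ((n % 40 : Nat) : Int) (p.length : Int)) 0
        = p.getD (n % p.length) 0 := by
      rw [PySem.Int.mod_natCast, PySem.List.pyGetD_natCast,
        Nat.mod_mod_of_dvd n hL]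
    have hiff : (((n % 40 : Nat) : Int) ∈ PySem.List.pyRange 0 40 1 ∧
        PySem.List.pyGetD p (PySem.Int.mod ((n % 40 : Nat) : Int) (p.length : Int)) 0 = xs.getD n 0)
        ↔ (p.getD (n % p.length) 0 = xs.getD n 0) := by
      rw [hf]; exact ⟨fun h => h.2, fun h => ⟨hmem, h⟩⟩
    rw [if_congr hiff rfl rfl]
    by_cases h : p.getD (n % p.length) 0 = xs.getD n 0
    · simp
    · simp only [h, decide_false]
      push_cast
      ring

lemma pvSorted3 (a b c x y z : Int) (hperm : List.Perm [x, y, z] [a, b, c])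
    (h1 : x ≤ y) (h2 : y ≤ z) :
    PySem.List.sorted [a, b, c] (fun t => t) false = [x, y, z] :=
  PySem.List.sorted_id_eq_of_perm_of_pairwise _ _ hperm (by simp [h1, h2, le_trans h1 h2])

-- the last element of the sorted 3-list is the maximum
lemma pvMax3 (a b c : Int) :
    PySem.List.pyGetD (PySem.List.sorted [a, b, c] (fun x => x) false) 2 0
      = max (max a b) c := by
  rcases le_total a b with hab | hab
  · rcases le_total b c with hbc | hbc
    · rw [pvSorted3 a b c a b c (List.Perm.refl _) hab hbc]
      simp [PySem.List.pyGetD]; omega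
    · rcases le_total a c with hac | hac
      · rw [pvSorted3 a b c a c b (List.Perm.cons _ (List.Perm.swap _ _ _)) hac hbc]
        simp [PySem.List.pyGetD]; omega
      · rw [pvSorted3 a b c c a b
          ((List.Perm.swap _ _ _).trans (List.Perm.cons _ (List.Perm.swap _ _ _))) hac hab]
        simp [PySem.List.pyGetD]; omega
  · rcases le_total b c with hbc | hbc
    · rcases le_total a c with hac | hac
      · rw [pvSorted3 a b c b a c (List.Perm.swap _ _ _) hab hac]
        simp [PySem.List.pyGetD]; omega
      · rw [pvSorted3 a b c b c a
          ((List.Perm.cons _ (List.Perm.swap _ _ _)).trans (List.Perm.swap _ _ _)) hbc hac]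
        simp [PySem.List.pyGetD]; omega
    · rw [pvSorted3 a b c c b a
          (((List.Perm.swap _ _ _).trans (List.Perm.cons _ (List.Perm.swap _ _ _))).trans (List.Perm.swap _ _ _)) hbc hab]
      simp [PySem.List.pyGetD]; omega

-- both tails agree as functions of the three scores
set_option maxRecDepth 8192 in
lemma pvTail (x y z : Int) :
    (([(1, x), (2, y), (3, z)] : List (Int × Int)).foldl
        (fun acc kv => if kv.2 = PySem.List.pyGetD
            (PySem.List.sorted ((([(1, x), (2, y), (3, z)] : List (Int × Int)).foldl
              (fun acc kv => acc ++ [kv.2]) [])) (fun t => t) false) 2 0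
          then acc ++ [kv.1] else acc) [])
      = ((PySem.List.pyRange 0 3 1).filter
          (fun j => PySem.List.pyGetD [x, y, z] j 0 = (PySem.List.max? [x, y, z] (fun t => t)).getD 0)).map
          (fun j => j + 1) := by
  have hfold : (([(1, x), (2, y), (3, z)] : List (Int × Int)).foldl
      (fun acc kv => acc ++ [kv.2]) []) = [x, y, z] := by simp
  rw [hfold]
  have hmA := pvMax3 x y z
  have hmB : (PySem.List.max? [x, y, z] (fun t => t)).getD 0 = max (max x y) z := by
    rw [PySem.List.max?_id_cons]
    simp [List.foldl]
  rw [hmB]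
  have hr : PySem.List.pyRange 0 3 1 = [0, 1, 2] := by decide
  rw [hr]
  simp only [List.foldl_cons, List.foldl_nil, List.filter]
  rw [show PySem.List.sorted [x, y, z] (fun t => t) false
        = PySem.List.sorted [x, y, z] (fun t : Int => t) false from rfl] at *
  rw [hmA]
  have g0 : PySem.List.pyGetD [x, y, z] 0 0 = x := by simp [PySem.List.pyGetD, PySem.List.pyGet?, PySem.List.pyIdx?]
  have g1 : PySem.List.pyGetD [x, y, z] 1 0 = y := by simp [PySem.List.pyGetD, PySem.List.pyGet?, PySem.List.pyIdx?]
  have g2 : PySem.List.pyGetD [x, y, z] 2 0 = z := by simp [PySem.List.pyGetD, PySem.List.pyGet?, PySem.List.pyIdx?]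
  rw [g0, g1, g2]
  set M := max (max x y) z with hM
  by_cases hx : x = M <;> by_cases hy : y = M <;>
    by_cases hz : z = M <;> simp [hx, hy, hz]

-- ===== VERDICT =====
theorem solution_spec : Claim_equal_solution := by
  intro answers _
  unfold Spec_solution solution solution_alt
  have hrange : PySem.List.pyRange 0 (answers.length : Int) 1
      = (List.range answers.length).map (fun k => ((k : Nat) : Int)) := by
    rw [PySem.List.pyRange_one]
    simp
  have henum : PySem.List.enumerate answers 0
      = (List.range answers.length).map (fun k => (((k : Nat) : Int), answers.getD k 0)) := by
    have := pvEnum answers 0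
    simpa using this
  rw [hrange, pvCnt_A answers answers.length 0 0 0, henum]
  simp only [zero_add, List.map_cons, List.map_nil]
  simp only [pvBuild answers [1, 2, 3, 4, 5] (by norm_num) answers.length,
      pvBuild answers [2, 1, 2, 3, 2, 4, 2, 5] (by norm_num) answers.length,
      pvBuild answers [3, 3, 1, 1, 2, 2, 4, 4, 5, 5] (by norm_num) answers.length]
  exact pvTail _ _ _
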